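-- pv_equiv track=rewrite | github.com/zknepp1/Food-Cuisine-Prediction | project2.py | pull_key
-- ===== SOURCE A (Python) =====
-- def pull_key(d):
--   categories = []
--   ingredients = []
--
--   for key, value in d.items():
--     if key == 'cuisine':
--       categories.append(value)
--     elif key == 'ingredients':
--       ingredients.append(value)
--
--   return categories, ingredients
-- ===== SOURCE B (Python) =====
-- def pull_key(d):
--   # No loop: direct key access (dict keys are unique, so each list has at most one element).
--   categories = [d['cuisine']] if 'cuisine' in d else []
--   ingredients = [d['ingredients']] if 'ingredients' in d else []
--   return categories, ingredients
-- ===== Notes on version B (the rewrite author's own statement) =====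
-- stated objective: idiomatic
-- what changed: Replaces the full scan over d.items() with two direct membership-test-plus-lookup accesses; B has no loop at all.
import Mathlib
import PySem

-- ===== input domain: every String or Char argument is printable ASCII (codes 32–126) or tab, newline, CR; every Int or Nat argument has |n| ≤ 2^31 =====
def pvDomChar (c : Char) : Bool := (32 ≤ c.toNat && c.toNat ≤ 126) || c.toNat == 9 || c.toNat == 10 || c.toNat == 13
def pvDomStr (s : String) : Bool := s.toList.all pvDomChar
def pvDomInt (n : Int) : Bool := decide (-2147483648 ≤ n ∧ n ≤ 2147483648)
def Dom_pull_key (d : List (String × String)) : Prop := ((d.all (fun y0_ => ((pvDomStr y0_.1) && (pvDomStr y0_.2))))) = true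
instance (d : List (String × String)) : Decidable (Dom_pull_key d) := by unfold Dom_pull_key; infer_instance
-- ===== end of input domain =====

-- ===== PORT A =====
-- Literal port of A: one pass over d.items(), appending into two accumulators.
def pull_key (d : List (String × String)) : List String × List String :=
  d.foldl (fun st kv =>
    if kv.1 = "cuisine" then (st.1 ++ [kv.2], st.2)
    else if kv.1 = "ingredients" then (st.1, st.2 ++ [kv.2])
    else st) ([], [])

-- ===== PORT B =====
-- Port of B: no loop; two direct first-match lookups ('k in d' + d[k]).
def pull_key_alt (d : List (String × String)) : List String × List String :=
  ((match d.lookup "cuisine" with | some v => [v] | none => []),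
   (match d.lookup "ingredients" with | some v => [v] | none => []))

-- ===== PRECONDITION & SPEC =====
-- Pre_ requires the association list's keys to be distinct: it represents a Python
-- dict, whose keys are necessarily unique, so this excludes no Python input.
def Pre_pull_key (d : List (String × String)) : Prop := (d.map Prod.fst).Nodup
instance (d : List (String × String)) : Decidable (Pre_pull_key d) := by unfold Pre_pull_key; infer_instance
def pvWitness_pull_key : (List (String × String)) := [("cuisine", "thai"), ("id", "7"), ("ingredients", "rice")]
def Spec_pull_key (d : List (String × String)) (out : List String × List String) : Prop := out = pull_key_alt d
instance (d : List (String × String)) (out : List String × List String) : Decidable (Spec_pull_key d out) := by unfold Spec_pull_key; infer_instance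

-- ===== CLAIM (what is proved, stated in full; the proofs are below) =====
def Claim_equal_pull_key : Prop := ∀ (d : List (String × String)), Dom_pull_key d → Pre_pull_key d → Spec_pull_key d (pull_key d)

-- ===== LEMMAS AND PROOFS =====

-- the loop of A, started from any accumulators, appends exactly B's two singleton-or-empty lists
theorem pull_key_loop (d : List (String × String)) (h : (d.map Prod.fst).Nodup) :
    ∀ cs is : List String,
      d.foldl (fun st kv =>
        if kv.1 = "cuisine" then (st.1 ++ [kv.2], st.2)
        else if kv.1 = "ingredients" then (st.1, st.2 ++ [kv.2])
        else st) (cs, is)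
      = (cs ++ (pull_key_alt d).1, is ++ (pull_key_alt d).2) := by
  induction d with
  | nil => intro cs is; simp [pull_key_alt]
  | cons kv rest ih =>
    intro cs is
    obtain ⟨k, v⟩ := kv
    simp only [List.map_cons, List.nodup_cons, List.mem_map] at h
    obtain ⟨hk, hrest⟩ := h
    have hlk : ∀ (x : String) (l : List (String × String)), (∀ p ∈ l, p.1 ≠ x) → l.lookup x = none := by
      intro x l hx
      induction l with
      | nil => rfl
      | cons p t ih =>
        have hne : (x == p.1) = false :=
          beq_eq_false_iff_ne.mpr (fun e => hx p (List.mem_cons_self ..) e.symm)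
        simp [List.lookup, hne, ih (fun q hq => hx q (List.mem_cons_of_mem _ hq))]
    by_cases h1 : k = "cuisine"
    · subst h1
      have hnone : rest.lookup "cuisine" = none := hlk "cuisine" rest (fun p hp e => hk ⟨p, hp, e⟩)
      have eic : ("ingredients" == "cuisine") = false := by decide
      simp only [List.foldl_cons, ih hrest]
      simp [pull_key_alt, List.lookup, hnone, eic]
    · by_cases h2 : k = "ingredients"
      · subst h2
        have hnone : rest.lookup "ingredients" = none := hlk "ingredients" rest (fun p hp e => hk ⟨p, hp, e⟩)
        have eci : ("cuisine" == "ingredients") = false := by decide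
        simp only [List.foldl_cons, if_neg h1, ih hrest]
        simp [pull_key_alt, List.lookup, hnone, eci]
      · have e1 : ("cuisine" == k) = false := beq_eq_false_iff_ne.mpr (Ne.symm h1)
        have e2 : ("ingredients" == k) = false := beq_eq_false_iff_ne.mpr (Ne.symm h2)
        simp only [List.foldl_cons, if_neg h1, if_neg h2, ih hrest]
        simp [pull_key_alt, List.lookup, e1, e2]

-- ===== VERDICT (by name: the statement is the Claim_ definition above) =====
theorem pull_key_spec : Claim_equal_pull_key := by
  intro d _ hpre
  unfold Spec_pull_key pull_key
  rw [pull_key_loop d hpre [] []]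
  simp
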